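-- pv_equiv track=rewrite | github.com/Cfgaar/Python | Codewars/7kyu/series_complete.py | complete_series
-- ===== SOURCE A (Python) =====
-- def complete_series(seq):
--     for i in range(len(seq)):
--         if seq.count(seq[i])>1:
--             return [0]
--         else:
--              continue
--     seq=[(max(seq))]
--     for x in range(max(seq)-1, -1, -1):
--         seq.append(x)
--     seq.reverse()
--     return seq
-- ===== SOURCE B (Python) =====
-- def complete_series(seq):
--     s = sorted(seq)
--     for i in range(1, len(s)):
--         if s[i] == s[i - 1]:
--             return [0]
--     return list(range(max(seq))) + [max(seq)]
-- ===== Notes on version B (the rewrite author's own statement) =====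
-- stated objective: alternative
-- what changed: Duplicate detection via the O(n^2) count-of-each-element scan is replaced by a sort followed by a single adjacent-pair scan, and the reverse-building append loop is replaced by a direct range(max)+[max] construction.
import Mathlib
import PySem

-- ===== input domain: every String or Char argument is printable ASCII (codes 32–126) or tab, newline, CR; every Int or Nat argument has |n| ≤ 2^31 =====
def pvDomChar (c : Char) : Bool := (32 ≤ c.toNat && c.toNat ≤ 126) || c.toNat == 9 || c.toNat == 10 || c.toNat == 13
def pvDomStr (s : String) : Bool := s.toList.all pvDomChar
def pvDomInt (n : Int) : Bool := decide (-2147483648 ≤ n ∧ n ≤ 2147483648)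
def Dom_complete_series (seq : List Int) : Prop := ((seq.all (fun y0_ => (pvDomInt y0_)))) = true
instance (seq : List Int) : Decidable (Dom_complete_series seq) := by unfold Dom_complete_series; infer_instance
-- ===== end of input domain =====

-- B replaces A's O(n^2) count-based duplicate scan by a sort + adjacent-pair scan and builds
-- the result directly as range(max)+[max] instead of A's descending append loop plus reverse.

-- ===== PORT A =====
-- A's first loop: 'for i in range(len(seq)): if seq.count(seq[i]) > 1: return [0]'
def csA_dupLoop (seq : List Int) : List Int → Bool
  | [] => false
  | i :: rest =>
    if 1 < PySem.List.count seq (PySem.List.pyGetD seq i 0) then true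
    else csA_dupLoop seq rest

def complete_series (seq : List Int) : List Int :=
  if csA_dupLoop seq (PySem.List.pyRange 0 seq.length 1) then [0]
  else
    match PySem.List.max? seq (fun x => x) with
    | none => []   -- max([]) raises ValueError in Python; excluded by Pre_
    | some m =>
      -- seq = [max(seq)]; for x in range(max(seq)-1, -1, -1): seq.append(x); seq.reverse()
      ((PySem.List.pyRange (m - 1) (-1) (-1)).foldl (fun acc x => acc ++ [x]) [m]).reverse

-- ===== PORT B =====
-- B's loop: 'for i in range(1, len(s)): if s[i] == s[i-1]: return [0]'
def csB_adjLoop (s : List Int) : List Int → Bool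
  | [] => false
  | i :: rest =>
    if PySem.List.pyGetD s i 0 == PySem.List.pyGetD s (i - 1) 0 then true
    else csB_adjLoop s rest

def complete_series_alt (seq : List Int) : List Int :=
  let s := PySem.List.sorted seq (fun x => x) false
  if csB_adjLoop s (PySem.List.pyRange 1 s.length 1) then [0]
  else
    match PySem.List.max? seq (fun x => x) with
    | none => []   -- max([]) raises ValueError in Python; excluded by Pre_
    | some m => PySem.List.pyRange 0 m 1 ++ [m]

-- ===== PRECONDITION & SPEC =====
-- Pre_ excludes only the empty list, on which Python's max([]) raises ValueError in both A and B.
def Pre_complete_series (seq : List Int) : Prop := seq ≠ []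
instance (seq : List Int) : Decidable (Pre_complete_series seq) := by unfold Pre_complete_series; infer_instance

def pvWitness_complete_series : List Int := [2, 0, 1]

def Spec_complete_series (seq : List Int) (out : List Int) : Prop := out = complete_series_alt seq
instance (seq : List Int) (out : List Int) : Decidable (Spec_complete_series seq out) := by unfold Spec_complete_series; infer_instance

-- ===== CLAIM (what is proved, stated in full; the proofs are below) =====
def Claim_equal_complete_series : Prop := ∀ (seq : List Int), Dom_complete_series seq → Pre_complete_series seq → Spec_complete_series seq (complete_series seq)

-- ===== LEMMAS AND PROOFS =====

-- A's loop is an 'any' over the index list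
lemma csA_dupLoop_eq_any (seq : List Int) (l : List Int) :
    csA_dupLoop seq l = l.any (fun i => decide (1 < PySem.List.count seq (PySem.List.pyGetD seq i 0))) := by
  induction l with
  | nil => rfl
  | cons i rest ih =>
    simp only [csA_dupLoop, List.any_cons, ih]
    by_cases h : 1 < PySem.List.count seq (PySem.List.pyGetD seq i 0)
    · rw [if_pos h, decide_eq_true h, Bool.true_or]
    · rw [if_neg h, decide_eq_false h, Bool.false_or]

-- B's loop is an 'any' over the index list
lemma csB_adjLoop_eq_any (s : List Int) (l : List Int) :
    csB_adjLoop s l = l.any (fun i => PySem.List.pyGetD s i 0 == PySem.List.pyGetD s (i - 1) 0) := by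
  induction l with
  | nil => rfl
  | cons i rest ih =>
    simp only [csB_adjLoop, List.any_cons, ih]
    cases PySem.List.pyGetD s i 0 == PySem.List.pyGetD s (i - 1) 0 <;> simp

-- A's scan over range(len(seq)) detects exactly a repeated element
lemma csA_iff (seq : List Int) :
    csA_dupLoop seq (PySem.List.pyRange 0 seq.length 1) = true ↔ ¬ seq.Nodup := by
  rw [csA_dupLoop_eq_any, List.any_eq_true]
  constructor
  · rintro ⟨i, hi, hp⟩
    rw [PySem.List.mem_pyRange_one] at hi
    have hin : PySem.Raise.InRange seq.length i := by
      simp [PySem.Raise.InRange]; omega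
    have hmem := PySem.List.pyGetD_mem seq (0 : Int) hin
    simp only [decide_eq_true_eq, PySem.List.count_eq] at hp
    intro hnd
    have := List.nodup_iff_count_le_one.mp hnd (PySem.List.pyGetD seq i 0)
    omega
  · intro hnd
    obtain ⟨v, hv⟩ : ∃ v, 1 < seq.count v := by
      by_contra h
      push Not at h
      exact hnd (List.nodup_iff_count_le_one.mpr fun a => by have := h a; omega)
    have hvmem : v ∈ seq := List.count_pos_iff.mp (by omega)
    obtain ⟨k, hk, hkv⟩ := List.mem_iff_getElem.mp hvmem
    refine ⟨(k : Int), ?_, ?_⟩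
    · rw [PySem.List.mem_pyRange_one]; constructor <;> [positivity; exact_mod_cast hk]
    · have hg : PySem.List.pyGetD seq (k : Int) 0 = seq[k] :=
        PySem.List.pyGetD_eq_getElem seq 0 (by positivity) (by exact_mod_cast hk)
      simp only [hg, hkv, decide_eq_true_eq, PySem.List.count_eq]
      exact hv

-- on a (≤)-pairwise list, B's adjacent scan finds an equal pair iff the list is not Nodup
lemma csB_iff (s : List Int) (hs : s.Pairwise (· ≤ ·)) :
    csB_adjLoop s (PySem.List.pyRange 1 s.length 1) = true ↔ ¬ s.Nodup := by
  rw [csB_adjLoop_eq_any, List.any_eq_true]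
  have key : (∃ i ∈ PySem.List.pyRange 1 (s.length : Int) 1,
      (PySem.List.pyGetD s i 0 == PySem.List.pyGetD s (i - 1) 0) = true) ↔
      ∃ k, ∃ _ : k + 1 < s.length, s[k + 1] = s[k] := by
    constructor
    · rintro ⟨i, hi, hp⟩
      rw [PySem.List.mem_pyRange_one] at hi
      have h1 : PySem.List.pyGetD s i 0 = s[i.toNat] :=
        PySem.List.pyGetD_eq_getElem s 0 (by omega) hi.2
      have h2 : PySem.List.pyGetD s (i - 1) 0 = s[(i - 1).toNat] :=
        PySem.List.pyGetD_eq_getElem s 0 (by omega) (by omega)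
      refine ⟨(i - 1).toNat, by omega, ?_⟩
      rw [h1, h2, beq_iff_eq] at hp
      convert hp using 2
      all_goals omega
    · rintro ⟨k, hk, hkv⟩
      refine ⟨((k : Int) + 1), ?_, ?_⟩
      · rw [PySem.List.mem_pyRange_one]; omega
      · have h1 : PySem.List.pyGetD s ((k : Int) + 1) 0 = s[((k : Int) + 1).toNat] :=
          PySem.List.pyGetD_eq_getElem s 0 (by omega) (by omega)
        have h2 : PySem.List.pyGetD s ((k : Int) + 1 - 1) 0 = s[((k : Int) + 1 - 1).toNat] :=
          PySem.List.pyGetD_eq_getElem s 0 (by omega) (by omega)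
        rw [h1, h2, beq_iff_eq]
        have e1 : ((k : Int) + 1).toNat = k + 1 := by omega
        have e2 : ((k : Int) + 1 - 1).toNat = k := by omega
        simp only [e1, e2]
        exact hkv
  rw [key]
  constructor
  · rintro ⟨k, hk, hkv⟩ hnd
    have := (List.Nodup.getElem_inj_iff hnd).mp hkv
    omega
  · intro hnd
    by_contra h
    push Not at h
    apply hnd
    have hlt : List.IsChain (· < ·) s := by
      rw [List.isChain_iff_getElem]
      intro i hi
      have hle : s[i] ≤ s[i + 1] :=
        (List.pairwise_iff_getElem.mp hs) i (i + 1) (by omega) hi (by omega)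
      have hne := h i hi
      omega
    exact (List.IsChain.pairwise hlt).imp ne_of_lt

-- A's descending append-then-reverse build equals B's range(m)+[m]
lemma build_eq (m : Int) :
    ((PySem.List.pyRange (m - 1) (-1) (-1)).foldl (fun acc x => acc ++ [x]) [m]).reverse =
      PySem.List.pyRange 0 m 1 ++ [m] := by
  rw [PySem.List.foldl_append_singleton]
  have : PySem.List.pyRange (m - 1) (-1) (-1) = (PySem.List.pyRange 0 m 1).reverse := by
    rw [PySem.List.pyRange_neg_one_eq_reverse]; norm_num
  simp [this]

-- ===== VERDICT (by name: the statement is the Claim_ definition above) =====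
theorem complete_series_spec : Claim_equal_complete_series := by
  intro seq _ _
  unfold Spec_complete_series complete_series complete_series_alt
  dsimp only
  have hperm := PySem.List.sorted_perm seq (fun x => x) false
  have hnd : (PySem.List.sorted seq (fun x => x) false).Nodup ↔ seq.Nodup := hperm.nodup_iff
  have hA := csA_iff seq
  have hB := csB_iff (PySem.List.sorted seq (fun x => x) false)
    (by simpa using PySem.List.sorted_pairwise seq (fun x => x))
  by_cases hdup : seq.Nodup
  · have hA' : csA_dupLoop seq (PySem.List.pyRange 0 seq.length 1) = false := by
      rw [Bool.eq_false_iff]; intro h; exact (hA.mp h) hdup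
    have hB' : csB_adjLoop (PySem.List.sorted seq (fun x => x) false)
        (PySem.List.pyRange 1 (PySem.List.sorted seq (fun x => x) false).length 1) = false := by
      rw [Bool.eq_false_iff]; intro h; exact (hB.mp h) (hnd.mpr hdup)
    rw [hA', hB']
    simp only [if_neg (Bool.false_ne_true)]
    cases PySem.List.max? seq (fun x => x) with
    | none => rfl
    | some m => exact build_eq m
  · rw [hA.mpr hdup, hB.mpr (fun h => hdup (hnd.mp h))]
    simp
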